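-- pv_equiv track=rewrite | github.com/yuukibarns/Lingvo-Universal-Ru-En | 1.py | convert_style
-- ===== SOURCE A (Python) =====
-- def convert_style(style_str):
--     """Convert HTML style to Yomitan style object"""
--     if not style_str:
--         return {}
--
--     styles = {}
--     for prop in style_str.split(";"):
--         prop = prop.strip()
--         if ":" not in prop:
--             continue
--         key, value = [p.strip() for p in prop.split(":", 1)]
--
--         if key == "color":
--             styles["color"] = value
--         elif key == "margin-left":
--             styles["marginLeft"] = value
--         elif key == "padding-left":
--             styles["paddingLeft"] = value
--         elif key == "margin":
--             styles["margin"] = value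
--         elif key == "padding":
--             styles["padding"] = value
--         elif key == "font-style" and value == "italic":
--             styles["fontStyle"] = "italic"
--         elif key == "font-weight" and value == "bold":
--             styles["fontWeight"] = "bold"
--         elif key == "text-decoration" and value == "underline":
--             styles["textDecorationLine"] = "underline"
--
--     return styles
-- ===== SOURCE B (Python) =====
-- # Character-scanner re-implementation: no str.split passes at all; one pass over
-- # the characters accumulates each ';'-terminated segment, which is emitted via
-- # find+slices through a single rule table.
-- _RULES = {
--     "color": (None, "color"),
--     "margin-left": (None, "marginLeft"),
--     "padding-left": (None, "paddingLeft"),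
--     "margin": (None, "margin"),
--     "padding": (None, "padding"),
--     "font-style": ("italic", "fontStyle"),
--     "font-weight": ("bold", "fontWeight"),
--     "text-decoration": ("underline", "textDecorationLine"),
-- }
--
-- def _apply(styles, key, value):
--     rule = _RULES.get(key)
--     if rule is not None and (rule[0] is None or rule[0] == value):
--         styles[rule[1]] = value
--
-- def convert_style(style_str):
--     """Convert HTML style to Yomitan style object"""
--     styles = {}
--     if not style_str:
--         return styles
--     buf = []
--     for ch in style_str + ";":
--         if ch == ";":
--             seg = "".join(buf).strip()
--             buf = []
--             i = seg.find(":")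
--             if i >= 0:
--                 _apply(styles, seg[:i].strip(), seg[i + 1:].strip())
--         else:
--             buf.append(ch)
--     return styles
-- ===== Notes on version B (the rewrite author's own statement) =====
-- stated objective: alternative
-- what changed: B replaces A's split(';')/split(':',1) passes by a single hand-rolled character scanner that accumulates each ';'-terminated segment in a buffer and emits it via find+slices through one rule table instead of the if/elif ladder.
import Mathlib
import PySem

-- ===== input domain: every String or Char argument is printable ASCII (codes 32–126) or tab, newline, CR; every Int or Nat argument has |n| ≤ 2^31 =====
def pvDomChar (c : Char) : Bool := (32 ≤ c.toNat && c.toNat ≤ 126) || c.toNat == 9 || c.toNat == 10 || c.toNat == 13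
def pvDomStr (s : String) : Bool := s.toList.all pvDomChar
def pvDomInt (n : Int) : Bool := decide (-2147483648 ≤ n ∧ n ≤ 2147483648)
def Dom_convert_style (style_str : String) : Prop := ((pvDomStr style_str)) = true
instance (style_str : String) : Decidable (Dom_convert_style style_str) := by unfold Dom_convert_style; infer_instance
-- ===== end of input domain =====

-- B replaces A's split(';')/split(':',1) passes by a hand-rolled single-pass character scanner
-- (buffer until ';', emit via find+slices through one rule table); same cost, alternative algorithm.

-- ===== PORT A =====
-- the body of A's for-loop (key := strip of the first split part, value := of the second, used inline)
def pvStepA (styles : PySem.Dict String String) (prop0 : String) : PySem.Dict String String :=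
  if PySem.Str.isIn ":" (PySem.Str.strip prop0) = false then styles
  else
    match PySem.Str.splitMax? (PySem.Str.strip prop0) ":" 1 with
    | some (k0 :: v0 :: _) =>
      if PySem.Str.strip k0 == "color" then styles.insert "color" (PySem.Str.strip v0)
      else if PySem.Str.strip k0 == "margin-left" then styles.insert "marginLeft" (PySem.Str.strip v0)
      else if PySem.Str.strip k0 == "padding-left" then styles.insert "paddingLeft" (PySem.Str.strip v0)
      else if PySem.Str.strip k0 == "margin" then styles.insert "margin" (PySem.Str.strip v0)
      else if PySem.Str.strip k0 == "padding" then styles.insert "padding" (PySem.Str.strip v0)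
      else if PySem.Str.strip k0 == "font-style" && PySem.Str.strip v0 == "italic" then styles.insert "fontStyle" "italic"
      else if PySem.Str.strip k0 == "font-weight" && PySem.Str.strip v0 == "bold" then styles.insert "fontWeight" "bold"
      else if PySem.Str.strip k0 == "text-decoration" && PySem.Str.strip v0 == "underline" then styles.insert "textDecorationLine" "underline"
      else styles
    | _ => styles

-- style_str.split(";") is PySem.Str.split? with the nonempty literal ";", hence `.getD []` is exact
def convert_style (style_str : String) : List (String × String) :=
  if style_str == "" then []
  else (((PySem.Str.split? style_str ";").getD []).foldl pvStepA PySem.Dict.empty).items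

-- ===== PORT B =====
-- the module constant _RULES
def pvRules : PySem.Dict String (Option String × String) :=
  PySem.Dict.ofList [("color", (none, "color")), ("margin-left", (none, "marginLeft")),
    ("padding-left", (none, "paddingLeft")), ("margin", (none, "margin")),
    ("padding", (none, "padding")), ("font-style", (some "italic", "fontStyle")),
    ("font-weight", (some "bold", "fontWeight")),
    ("text-decoration", (some "underline", "textDecorationLine"))]

-- _apply: one table lookup, optional required-value guard
def pvApply (styles : PySem.Dict String String) (key value : String) : PySem.Dict String String :=
  match pvRules.get? key with
  | none => styles
  | some rule =>
    if (match rule.1 with | none => true | some req => req == value) then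
      styles.insert rule.2 value
    else styles

-- the scanner's loop body: accumulate chars; at ';' emit the buffered segment via find+slices
-- ("".join(buf).strip() is Chars.strip of the buffer; seg.find(":")/seg[:i]/seg[i+1:] are Chars.find/slice)
def pvScanStep (st : PySem.Dict String String × List Char) (ch : Char) :
    PySem.Dict String String × List Char :=
  if ch == ';' then
    let seg := PySem.Chars.strip st.2
    let i := PySem.Chars.find seg [':']
    if 0 ≤ i then
      (pvApply st.1 (String.ofList (PySem.Chars.strip (PySem.Chars.slice seg none (some i))))
        (String.ofList (PySem.Chars.strip (PySem.Chars.slice seg (some (i + 1)) none))), [])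
    else (st.1, [])
  else (st.1, st.2 ++ [ch])

def convert_style_alt (style_str : String) : List (String × String) :=
  if style_str == "" then []
  else ((style_str.toList ++ [';']).foldl pvScanStep (PySem.Dict.empty, [])).1.items

-- ===== PRECONDITION & SPEC =====
def Spec_convert_style (style_str : String) (out : List (String × String)) : Prop := out = convert_style_alt style_str
instance (style_str : String) (out : List (String × String)) : Decidable (Spec_convert_style style_str out) := by unfold Spec_convert_style; infer_instance

-- ===== CLAIM (what is proved, stated in full; the proofs are below) =====
def Claim_equal_convert_style : Prop := ∀ (style_str : String), Dom_convert_style style_str → Spec_convert_style style_str (convert_style style_str)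

-- ===== LEMMAS AND PROOFS =====

-- the ';'-segments of a character list (structural form of str.split(";"))
def pvSegs : List Char → List (List Char)
  | [] => [[]]
  | c :: rest =>
    match pvSegs rest with
    | [] => [[c]]          -- unreachable: pvSegs is never []
    | h :: t => if c = ';' then [] :: h :: t else (c :: h) :: t

lemma pvSegs_ne_nil (l : List Char) : pvSegs l ≠ [] := by
  cases l with
  | nil => simp [pvSegs]
  | cons c rest =>
    simp only [pvSegs]
    rcases pvSegs rest with _ | ⟨h, t⟩ <;> split_ifs <;> simp_all

lemma pv_singleton_infix_iff (a : Char) (l : List Char) : [a] <:+: l ↔ a ∈ l := by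
  constructor
  · rintro ⟨s, t, rfl⟩; simp
  · intro h
    obtain ⟨s, t, rfl⟩ := List.append_of_mem h
    exact ⟨s, t, by simp⟩

lemma pv_splitOn_go (fuel : Nat) : ∀ (l cur : List Char) (acc : List (List Char)),
    l.length ≤ fuel →
    PySem.Chars.splitOn.go [';'] fuel l cur acc =
      acc.reverse ++ ((cur.reverse ++ (pvSegs l).headD []) :: (pvSegs l).tail) := by
  induction fuel with
  | zero =>
    intro l cur acc hl
    have : l = [] := List.eq_nil_of_length_eq_zero (Nat.le_zero.mp hl)
    subst this
    rw [PySem.Chars.splitOn.go]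
    simp [pvSegs]
  | succ n ih =>
    intro l cur acc hl
    cases l with
    | nil =>
      rw [PySem.Chars.splitOn.go]
      simp [pvSegs]
      omega
    | cons c rest =>
      rw [PySem.Chars.splitOn.go]
      simp only [List.length_cons] at hl
      by_cases hc : c = ';'
      · subst hc
        rw [if_pos (by simp [List.isPrefixOf])]
        show PySem.Chars.splitOn.go [';'] n rest [] (cur.reverse :: acc) = _
        rw [ih rest [] (cur.reverse :: acc) (by omega)]
        obtain ⟨h, t, hht⟩ : ∃ h t, pvSegs rest = h :: t := by
          rcases e : pvSegs rest with _ | ⟨h, t⟩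
          · exact absurd e (pvSegs_ne_nil rest)
          · exact ⟨h, t, rfl⟩
        simp [pvSegs, hht]
      · rw [if_neg (by simp [List.isPrefixOf, Ne.symm hc])]
        rw [ih rest (c :: cur) acc (by omega)]
        obtain ⟨h, t, hht⟩ : ∃ h t, pvSegs rest = h :: t := by
          rcases e : pvSegs rest with _ | ⟨h, t⟩
          · exact absurd e (pvSegs_ne_nil rest)
          · exact ⟨h, t, rfl⟩
        simp [pvSegs, hht, hc]

lemma pv_splitOn_eq_pvSegs (s : List Char) : PySem.Chars.splitOn s [';'] = pvSegs s := by
  rw [PySem.Chars.splitOn, pv_splitOn_go (s.length + 1) s [] [] (by omega)]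
  obtain ⟨h, t, hht⟩ : ∃ h t, pvSegs s = h :: t := by
    rcases e : pvSegs s with _ | ⟨h, t⟩
    · exact absurd e (pvSegs_ne_nil s)
    · exact ⟨h, t, rfl⟩
  simp [hht]

lemma pv_splitOnMax_go_zero (fuel : Nat) (l cur : List Char) (acc : List (List Char)) :
    PySem.Chars.splitOnMax.go [':'] fuel 0 l cur acc = acc.reverse ++ [cur.reverse ++ l] := by
  cases fuel with
  | zero => rw [PySem.Chars.splitOnMax.go]; simp
  | succ n =>
    cases l with
    | nil =>
      rw [PySem.Chars.splitOnMax.go]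
      simp
      omega
    | cons c rest => rw [PySem.Chars.splitOnMax.go]; simp

lemma pv_splitOnMax_go_one (fuel : Nat) : ∀ (l cur : List Char) (acc : List (List Char)),
    l.length ≤ fuel →
    PySem.Chars.splitOnMax.go [':'] fuel 1 l cur acc =
      if ':' ∈ l then
        acc.reverse ++ [cur.reverse ++ l.takeWhile (· ≠ ':'), (l.dropWhile (· ≠ ':')).tail]
      else acc.reverse ++ [cur.reverse ++ l] := by
  induction fuel with
  | zero =>
    intro l cur acc hl
    have : l = [] := List.eq_nil_of_length_eq_zero (Nat.le_zero.mp hl)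
    subst this
    rw [PySem.Chars.splitOnMax.go]
    simp
  | succ n ih =>
    intro l cur acc hl
    cases l with
    | nil =>
      rw [PySem.Chars.splitOnMax.go]
      simp
      omega
    | cons c rest =>
      rw [PySem.Chars.splitOnMax.go]
      simp only [List.length_cons] at hl
      by_cases hc : c = ':'
      · subst hc
        rw [if_neg (by omega), if_pos (by simp [List.isPrefixOf])]
        show PySem.Chars.splitOnMax.go [':'] n (1 - 1) rest [] (cur.reverse :: acc) = _
        simp only [Nat.sub_self]
        rw [pv_splitOnMax_go_zero]
        simp [List.takeWhile, List.dropWhile]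
      · rw [if_neg (by omega), if_neg (by simp [List.isPrefixOf, Ne.symm hc])]
        rw [ih rest (c :: cur) acc (by omega)]
        by_cases hm : ':' ∈ rest
        · rw [if_pos hm, if_pos (by simp [hm])]
          simp [hc]
        · rw [if_neg hm, if_neg (by simp [hm, Ne.symm hc])]
          simp

lemma pv_splitOnMax_one (t : List Char) :
    PySem.Chars.splitOnMax t [':'] 1 =
      if ':' ∈ t then [t.takeWhile (· ≠ ':'), (t.dropWhile (· ≠ ':')).tail]
      else [t] := by
  rw [PySem.Chars.splitOnMax, if_neg (by omega)]
  have : (1 : Int).toNat = 1 := rfl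
  rw [this, pv_splitOnMax_go_one (t.length + 1) t [] [] (by omega)]
  split_ifs <;> simp

lemma pv_singleton_prefix_iff (a : Char) (l : List Char) : [a] <+: l ↔ l.head? = some a := by
  cases l with
  | nil => simp
  | cons b t =>
    constructor
    · rintro ⟨r, hr⟩
      simp at hr
      simp [hr.1]
    · intro h
      simp at h
      exact ⟨t, by simp [h]⟩

lemma pv_take_drop_of_first (t : List Char) : ∀ (i : Nat),
    t[i]? = some ':' → (∀ j, j < i → t[j]? ≠ some ':') →
    t.takeWhile (· ≠ ':') = t.take i ∧ t.dropWhile (· ≠ ':') = t.drop i := by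
  induction t with
  | nil => intro i hi _; simp at hi
  | cons c rest ih =>
    intro i hi hmin
    cases i with
    | zero =>
      simp at hi
      simp [hi]
    | succ k =>
      have hc : c ≠ ':' := by
        intro h
        exact hmin 0 (Nat.succ_pos k) (by simp [h])
      have := ih k (by simpa using hi) (fun j hj => by
        have := hmin (j + 1) (by omega)
        simpa using this)
      simp only [ne_eq, decide_not] at this
      simp [hc, this.1, this.2]

lemma pv_get?_mk_nil {v : Type} (k : String) : (PySem.Dict.mk ([] : List (String × v))).get? k = none := rfl

-- B's _apply written out as A's ladder
set_option maxHeartbeats 1000000 in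
lemma pvApply_eval (d : PySem.Dict String String) (key value : String) :
    pvApply d key value =
      (if key == "color" then d.insert "color" value
       else if key == "margin-left" then d.insert "marginLeft" value
       else if key == "padding-left" then d.insert "paddingLeft" value
       else if key == "margin" then d.insert "margin" value
       else if key == "padding" then d.insert "padding" value
       else if key == "font-style" && value == "italic" then d.insert "fontStyle" "italic"
       else if key == "font-weight" && value == "bold" then d.insert "fontWeight" "bold"
       else if key == "text-decoration" && value == "underline" then d.insert "textDecorationLine" "underline"
       else d) := by
  have hr : pvRules = PySem.Dict.mk [("color", (none, "color")), ("margin-left", (none, "marginLeft")),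
      ("padding-left", (none, "paddingLeft")), ("margin", (none, "margin")),
      ("padding", (none, "padding")), ("font-style", (some "italic", "fontStyle")),
      ("font-weight", (some "bold", "fontWeight")),
      ("text-decoration", (some "underline", "textDecorationLine"))] := by rfl
  simp only [pvApply, hr, PySem.Dict.get?_mk_cons, beq_iff_eq]
  by_cases h1 : key = "color"
  · simp [h1]
  by_cases h2 : key = "margin-left"
  · simp [Ne.symm h1, h2]
  by_cases h3 : key = "padding-left"
  · simp [h1, Ne.symm h1, h2, Ne.symm h2, h3]
  by_cases h4 : key = "margin"
  · simp [h1, Ne.symm h1, h2, Ne.symm h2, h3, Ne.symm h3, h4]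
  by_cases h5 : key = "padding"
  · simp [h1, Ne.symm h1, h2, Ne.symm h2, h3, Ne.symm h3, h4, Ne.symm h4, h5]
  by_cases h6 : key = "font-style"
  · by_cases hv : value = "italic"
    · subst hv
      simp [h1, Ne.symm h1, h2, Ne.symm h2, h3, Ne.symm h3, h4, Ne.symm h4, h5, Ne.symm h5, h6, pv_get?_mk_nil]
    · simp [h1, Ne.symm h1, h2, Ne.symm h2, h3, Ne.symm h3, h4, Ne.symm h4, h5, Ne.symm h5, h6, hv,
        Ne.symm hv, pv_get?_mk_nil]
  by_cases h7 : key = "font-weight"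
  · by_cases hv : value = "bold"
    · subst hv
      simp [h1, Ne.symm h1, h2, Ne.symm h2, h3, Ne.symm h3, h4, Ne.symm h4, h5, Ne.symm h5, h6,
        Ne.symm h6, h7, pv_get?_mk_nil]
    · simp [h1, Ne.symm h1, h2, Ne.symm h2, h3, Ne.symm h3, h4, Ne.symm h4, h5, Ne.symm h5, h6,
        Ne.symm h6, h7, hv, Ne.symm hv, pv_get?_mk_nil]
  by_cases h8 : key = "text-decoration"
  · by_cases hv : value = "underline"
    · subst hv
      simp [h1, Ne.symm h1, h2, Ne.symm h2, h3, Ne.symm h3, h4, Ne.symm h4, h5, Ne.symm h5, h6,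
        Ne.symm h6, h7, Ne.symm h7, h8, pv_get?_mk_nil]
    · simp [h1, Ne.symm h1, h2, Ne.symm h2, h3, Ne.symm h3, h4, Ne.symm h4, h5, Ne.symm h5, h6,
        Ne.symm h6, h7, Ne.symm h7, h8, hv, Ne.symm hv, pv_get?_mk_nil]
  simp [h1, Ne.symm h1, h2, Ne.symm h2, h3, Ne.symm h3, h4, Ne.symm h4, h5, Ne.symm h5, h6,
    Ne.symm h6, h7, Ne.symm h7, h8, Ne.symm h8, pv_get?_mk_nil]

-- the emit computation of the scanner's ';' branch, on the raw buffer
def pvEmit (d : PySem.Dict String String) (buf : List Char) : PySem.Dict String String :=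
  let seg := PySem.Chars.strip buf
  let i := PySem.Chars.find seg [':']
  if 0 ≤ i then
    pvApply d (String.ofList (PySem.Chars.strip (PySem.Chars.slice seg none (some i))))
      (String.ofList (PySem.Chars.strip (PySem.Chars.slice seg (some (i + 1)) none)))
  else d

-- per-segment agreement: A's strip/in/split(":",1)/ladder equals the scanner's emit
lemma pv_strip_ofList (x : List Char) :
    PySem.Str.strip (String.ofList x) = String.ofList (PySem.Chars.strip x) := by
  simp [PySem.Str.strip]

lemma pv_step_seg (d : PySem.Dict String String) (seg : List Char) :
    pvStepA d (String.ofList seg) = pvEmit d seg := by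
  by_cases hmem : ':' ∈ PySem.Chars.strip seg
  case neg =>
    have hchars : PySem.Chars.isIn [':'] (PySem.Chars.strip seg) = false := by
      rw [PySem.Chars.isIn_eq_false_iff, pv_singleton_infix_iff]
      exact hmem
    have hin : PySem.Str.isIn ":" (PySem.Str.strip (String.ofList seg)) = false := by
      rw [pv_strip_ofList]
      have hsep : (":" : String).toList = [':'] := by decide
      simp [PySem.Str.isIn, hsep, hchars]
    have hfind : ¬ (0 ≤ PySem.Chars.find (PySem.Chars.strip seg) [':']) := by
      rw [PySem.Chars.find_nonneg_iff, pv_singleton_infix_iff]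
      exact hmem
    simp only [pvStepA, hin, if_pos]
    simp [pvEmit, hfind]
  case pos =>
    have hinfix : [':'] <:+: PySem.Chars.strip seg := (pv_singleton_infix_iff _ _).mpr hmem
    have hfind : 0 ≤ PySem.Chars.find (PySem.Chars.strip seg) [':'] :=
      (PySem.Chars.find_nonneg_iff _ _).mpr hinfix
    have hin : PySem.Str.isIn ":" (PySem.Str.strip (String.ofList seg)) = true := by
      rw [pv_strip_ofList]
      have hsep : (":" : String).toList = [':'] := by decide
      have : PySem.Chars.isIn [':'] (PySem.Chars.strip seg) = true := by
        rw [PySem.Chars.isIn_iff_infix]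
        exact hinfix
      simp [PySem.Str.isIn, hsep, this]
    obtain ⟨hpre, hmin⟩ := PySem.Chars.find_spec hfind
    have hget : (PySem.Chars.strip seg)[(PySem.Chars.find (PySem.Chars.strip seg) [':']).toNat]? = some ':' := by
      rw [← List.head?_drop]
      exact (pv_singleton_prefix_iff ':' _).mp hpre
    have hmin' : ∀ j, j < (PySem.Chars.find (PySem.Chars.strip seg) [':']).toNat →
        (PySem.Chars.strip seg)[j]? ≠ some ':' := by
      intro j hj hcontra
      exact hmin j hj ((pv_singleton_prefix_iff ':' _).mpr (by rw [List.head?_drop]; exact hcontra))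
    obtain ⟨htake, hdrop⟩ := pv_take_drop_of_first (PySem.Chars.strip seg) _ hget hmin'
    have hsm : PySem.Str.splitMax? (PySem.Str.strip (String.ofList seg)) ":" 1 =
        some [String.ofList ((PySem.Chars.strip seg).takeWhile (· ≠ ':')),
              String.ofList (((PySem.Chars.strip seg).dropWhile (· ≠ ':')).tail)] := by
      rw [pv_strip_ofList]
      have hsep : (":" : String).toList = [':'] := by decide
      simp only [PySem.Str.splitMax?, String.toList_ofList, hsep, PySem.Chars.splitMax?,
        List.isEmpty_cons, Bool.false_eq_true, if_false]
      rw [pv_splitOnMax_one, if_pos hmem]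
      rfl
    have hslice1 : PySem.Chars.slice (PySem.Chars.strip seg) none
        (some (PySem.Chars.find (PySem.Chars.strip seg) [':'])) =
        (PySem.Chars.strip seg).takeWhile (· ≠ ':') := by
      rw [PySem.Chars.slice_eq_listSlice, PySem.List.slice_to _ hfind, htake]
    have hslice2 : PySem.Chars.slice (PySem.Chars.strip seg)
        (some (PySem.Chars.find (PySem.Chars.strip seg) [':'] + 1)) none =
        ((PySem.Chars.strip seg).dropWhile (· ≠ ':')).tail := by
      rw [PySem.Chars.slice_eq_listSlice, PySem.List.slice_from _ (by omega)]
      have : (PySem.Chars.find (PySem.Chars.strip seg) [':'] + 1).toNat =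
          (PySem.Chars.find (PySem.Chars.strip seg) [':']).toNat + 1 := by omega
      rw [this, ← List.tail_drop, ← hdrop]
    simp only [pvStepA, hin, Bool.true_eq_false, if_false, hsm]
    simp only [pvEmit, hslice1, hslice2, if_pos hfind]
    rw [pvApply_eval, pv_strip_ofList, pv_strip_ofList]

-- the scanner invariant: folding the tail + final ';' from state (d, buf)
lemma pvScanStep_semi (d : PySem.Dict String String) (buf : List Char) :
    pvScanStep (d, buf) ';' = (pvEmit d buf, []) := by
  simp only [pvScanStep, pvEmit, beq_self_eq_true, if_pos]
  split_ifs <;> rfl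

lemma pvScanStep_other (d : PySem.Dict String String) (buf : List Char) (c : Char) (hc : c ≠ ';') :
    pvScanStep (d, buf) c = (d, buf ++ [c]) := by
  simp [pvScanStep, hc]

lemma pv_scan (s : List Char) : ∀ (d : PySem.Dict String String) (buf : List Char),
    ((s ++ [';']).foldl pvScanStep (d, buf)).1 =
      ((buf ++ (pvSegs s).headD []) :: (pvSegs s).tail).foldl pvEmit d := by
  induction s with
  | nil =>
    intro d buf
    simp [pvScanStep_semi, pvSegs]
  | cons c rest ih =>
    intro d buf
    obtain ⟨h, t, hht⟩ : ∃ h t, pvSegs rest = h :: t := by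
      rcases e : pvSegs rest with _ | ⟨h, t⟩
      · exact absurd e (pvSegs_ne_nil rest)
      · exact ⟨h, t, rfl⟩
    by_cases hc : c = ';'
    · subst hc
      simp only [List.cons_append, List.foldl_cons, pvScanStep_semi]
      rw [ih (pvEmit d buf) []]
      simp [pvSegs, hht]
    · simp only [List.cons_append, List.foldl_cons, pvScanStep_other d buf c hc]
      rw [ih d (buf ++ [c])]
      simp [pvSegs, hht, hc]

-- ===== VERDICT (by name: the statement is the Claim_ definition above) =====
theorem convert_style_spec : Claim_equal_convert_style := by
  intro s _
  unfold Spec_convert_style convert_style convert_style_alt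
  by_cases h : s == ""
  · simp [h]
  · simp only [h, Bool.false_eq_true, if_false]
    have hsep : (";" : String).toList = [';'] := by decide
    have hsplit : (PySem.Str.split? s ";").getD [] = (pvSegs s.toList).map String.ofList := by
      simp only [PySem.Str.split?, hsep, PySem.Chars.split?, List.isEmpty_cons,
        Bool.false_eq_true, if_false, Option.map_some, Option.getD_some]
      rw [pv_splitOn_eq_pvSegs]
    have hfun : (fun (d : PySem.Dict String String) (x : List Char) =>
        pvStepA d (String.ofList x)) = pvEmit := by
      funext d x
      exact pv_step_seg d x
    rw [hsplit, pv_scan s.toList PySem.Dict.empty [], List.foldl_map, hfun]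
    obtain ⟨h0, t0, hht⟩ : ∃ h0 t0, pvSegs s.toList = h0 :: t0 := by
      rcases e : pvSegs s.toList with _ | ⟨h0, t0⟩
      · exact absurd e (pvSegs_ne_nil s.toList)
      · exact ⟨h0, t0, rfl⟩
    rw [hht]
    simp
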